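-- pv_equiv track=rewrite | github.com/Artificial-Ridiculous/Codes | Python/offer/3.py | func
-- ===== SOURCE A (Python) =====
-- def func(s1,s2)-> bool:
--     lena,lenb = len(s1),len(s2)
--     ans = []
--     if lena == lenb*4:
--         for i in range(lenb):
--             ans = ans+s1[4*i:4*(i+1)]+[s2[i]]
--     elif lena < lenb*4:
--         for i in range(lena//4):
--             ans = ans+s1[4*i:4*(i+1)]+[s2[i]]
--         ans += s1[lena//4 * 4:]
--         ans += s2[lena//4:]
--     else:
--         for i in range(lenb):
--             ans = ans+s1[4*i:4*(i+1)]+[s2[i]]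
--         ans += s1[4*lenb:]
--     return ans
-- ===== SOURCE B (Python) =====
-- def func(s1, s2):
--     # Closed-form index map: the interleaved head is read off by position
--     # arithmetic (every 5th slot comes from s2, the rest from s1), then the
--     # leftovers of both lists are appended; O(n) vs A's repeated concatenation.
--     k = min(len(s1) // 4, len(s2))
--     head = [s2[p // 5] if p % 5 == 4 else s1[p - p // 5] for p in range(5 * k)]
--     return head + s1[4 * k:] + s2[k:]
-- ===== Notes on version B (the rewrite author's own statement) =====
-- stated objective: faster
-- what changed: Replaces A's three-way case analysis with quadratic repeated list concatenation (ans = ans + block + [x] in a loop) by a closed-form index map: one comprehension computes each head position p directly from s2 if p % 5 == 4 else s1[p - p//5], then the leftovers of both lists are appended once.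
import Mathlib
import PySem

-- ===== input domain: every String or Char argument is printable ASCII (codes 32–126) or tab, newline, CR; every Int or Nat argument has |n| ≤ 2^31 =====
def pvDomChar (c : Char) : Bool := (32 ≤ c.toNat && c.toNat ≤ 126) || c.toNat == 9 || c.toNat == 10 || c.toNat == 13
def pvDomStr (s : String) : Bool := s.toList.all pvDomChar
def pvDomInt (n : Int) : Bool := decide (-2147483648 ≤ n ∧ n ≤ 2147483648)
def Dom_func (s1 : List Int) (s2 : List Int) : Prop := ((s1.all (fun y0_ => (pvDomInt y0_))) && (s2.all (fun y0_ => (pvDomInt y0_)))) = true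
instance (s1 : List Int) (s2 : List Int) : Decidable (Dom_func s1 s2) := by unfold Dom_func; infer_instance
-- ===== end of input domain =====

-- B replaces A's branching loops of repeated list concatenation by a closed-form index map
-- built in one comprehension; objective: faster (measured).

-- ===== PORT A =====
-- s2[i] inside each loop is always in range (i < len(s2) in every branch), so pyGetD is exact there.
def func (s1 : List Int) (s2 : List Int) : List Int :=
  let lena : Int := s1.length
  let lenb : Int := s2.length
  if lena = lenb * 4 then
    (PySem.List.pyRange 0 lenb 1).foldl
      (fun ans i => ans ++ PySem.List.slice s1 (some (4*i)) (some (4*(i+1))) ++ [PySem.List.pyGetD s2 i 0]) []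
  else if lena < lenb * 4 then
    let ans := (PySem.List.pyRange 0 (PySem.Int.floordiv lena 4) 1).foldl
      (fun ans i => ans ++ PySem.List.slice s1 (some (4*i)) (some (4*(i+1))) ++ [PySem.List.pyGetD s2 i 0]) []
    let ans := ans ++ PySem.List.slice s1 (some (PySem.Int.floordiv lena 4 * 4)) none
    ans ++ PySem.List.slice s2 (some (PySem.Int.floordiv lena 4)) none
  else
    let ans := (PySem.List.pyRange 0 lenb 1).foldl
      (fun ans i => ans ++ PySem.List.slice s1 (some (4*i)) (some (4*(i+1))) ++ [PySem.List.pyGetD s2 i 0]) []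
    ans ++ PySem.List.slice s1 (some (4*lenb)) none

-- ===== PORT B =====
-- Source B's comprehension over range(5*k): the indices p//5 into s2 and p - p//5 into s1 are
-- always in range (k = min(len(s1)//4, len(s2))), so pyGetD is exact there.
def func_alt (s1 : List Int) (s2 : List Int) : List Int :=
  let k : Int := min (PySem.Int.floordiv (s1.length : Int) 4) (s2.length : Int)
  let head : List Int := (PySem.List.pyRange 0 (5*k) 1).map
    (fun p => if PySem.Int.mod p 5 = 4 then PySem.List.pyGetD s2 (PySem.Int.floordiv p 5) 0
              else PySem.List.pyGetD s1 (p - PySem.Int.floordiv p 5) 0)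
  head ++ PySem.List.slice s1 (some (4*k)) none ++ PySem.List.slice s2 (some k) none

-- ===== PRECONDITION & SPEC =====
def Spec_func (s1 : List Int) (s2 : List Int) (out : List Int) : Prop := out = func_alt s1 s2
instance (s1 : List Int) (s2 : List Int) (out : List Int) : Decidable (Spec_func s1 s2 out) := by unfold Spec_func; infer_instance

-- ===== CLAIM (what is proved, stated in full; the proofs are below) =====
def Claim_equal_func : Prop := ∀ (s1 : List Int) (s2 : List Int), Dom_func s1 s2 → Spec_func s1 s2 (func s1 s2)

-- ===== LEMMAS AND PROOFS =====

theorem slice4 (xs : List Int) (i : Nat) :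
    PySem.List.slice xs (some (i:Int)) (some ((i:Int)+4)) = (xs.drop i).take 4 := by
  have h := PySem.List.slice_natCast_add xs i 4
  have h4 : ((4:Nat):Int) = 4 := by norm_num
  rw [h4] at h
  exact h

-- A's in-loop step, rewritten over a Nat index.
theorem stepA (s1 s2 : List Int) (ans : List Int) (k : Nat) :
    ans ++ PySem.List.slice s1 (some (4*(k:Int))) (some (4*((k:Int)+1))) ++ [PySem.List.pyGetD s2 (k:Int) 0]
      = ans ++ ((s1.drop (4*k)).take 4 ++ [s2.getD k 0]) := by
  have h1 : (4*(k:Int)) = (((4*k : Nat)) : Int) := by push_cast; ring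
  have h2 : (4*((k:Int)+1)) = (((4*k : Nat)) : Int) + 4 := by push_cast; ring
  rw [h1, h2, slice4 s1 (4*k), PySem.List.pyGetD_natCast]
  simp [List.append_assoc]

-- A's loop over range(n) as a flatMap.
theorem Aloop (s1 s2 : List Int) (n : Nat) :
    (PySem.List.pyRange 0 (n:Int) 1).foldl
      (fun ans i => ans ++ PySem.List.slice s1 (some (4*i)) (some (4*(i+1))) ++ [PySem.List.pyGetD s2 i 0]) []
    = (List.range n).flatMap (fun i => (s1.drop (4*i)).take 4 ++ [s2.getD i 0]) := by
  rw [PySem.List.pyRange_zero_natCast, List.foldl_map]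
  simp only [stepA]
  rw [PySem.List.foldl_append_eq_flatMap]
  simp

-- A full 4-block of s1 written element by element.
theorem take4_drop (s1 : List Int) (m : Nat) (h : m + 4 ≤ s1.length) :
    (s1.drop m).take 4 = [s1.getD m 0, s1.getD (m+1) 0, s1.getD (m+2) 0, s1.getD (m+3) 0] := by
  rw [List.drop_eq_getElem_cons (by omega : m < s1.length),
      List.drop_eq_getElem_cons (by omega : m+1 < s1.length),
      List.drop_eq_getElem_cons (by omega : m+2 < s1.length),
      List.drop_eq_getElem_cons (by omega : m+3 < s1.length)]
  simp only [List.take_succ_cons, List.take_zero]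
  rw [List.getD_eq_getElem s1 0 (by omega : m < s1.length),
      List.getD_eq_getElem s1 0 (by omega : m+1 < s1.length),
      List.getD_eq_getElem s1 0 (by omega : m+2 < s1.length),
      List.getD_eq_getElem s1 0 (by omega : m+3 < s1.length)]

-- B's comprehension head (over Nat indices), characterised as the interleaving flatMap.
theorem BheadNat (s1 s2 : List Int) (k : Nat) (h1 : 4*k ≤ s1.length) (h2 : k ≤ s2.length) :
    (List.range (5*k)).map
      (fun p : Nat => if PySem.Int.mod (p:Int) 5 = 4 then PySem.List.pyGetD s2 (PySem.Int.floordiv (p:Int) 5) 0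
              else PySem.List.pyGetD s1 ((p:Int) - PySem.Int.floordiv (p:Int) 5) 0)
    = (List.range k).flatMap (fun i => (s1.drop (4*i)).take 4 ++ [s2.getD i 0]) := by
  induction k with
  | zero => simp
  | succ k ih =>
    have e : 5*(k+1) = 5*k + 5 := by ring
    rw [e, List.range_add, List.map_append, ih (by omega) (by omega), List.range_succ (n := k),
        List.flatMap_append, List.flatMap_cons, List.flatMap_nil]
    congr 1
    have hlist : (List.range 5).map (fun x => 5*k + x) = [5*k+0, 5*k+1, 5*k+2, 5*k+3, 5*k+4] := by
      simp [List.range_succ]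
    rw [hlist]
    simp only [List.map_cons, List.map_nil]
    have hfd : ∀ r : Nat, r < 5 → PySem.Int.floordiv ((5*k+r : Nat) : Int) 5 = (k : Int) := by
      intro r hr
      rw [PySem.Int.floordiv_eq_ediv_of_pos (by norm_num)]
      omega
    have hmd : ∀ r : Nat, r < 5 → PySem.Int.mod ((5*k+r : Nat) : Int) 5 = (r : Int) := by
      intro r hr
      rw [PySem.Int.mod_eq_emod_of_pos (by norm_num)]
      omega
    rw [hmd 0 (by omega), hmd 1 (by omega), hmd 2 (by omega), hmd 3 (by omega), hmd 4 (by omega),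
        hfd 0 (by omega), hfd 1 (by omega), hfd 2 (by omega), hfd 3 (by omega), hfd 4 (by omega)]
    norm_num
    have e0 : 5*(k:Int) - (k:Int) = ((4*k : Nat) : Int) := by push_cast; ring
    have e1 : 5*(k:Int) + 1 - (k:Int) = ((4*k+1 : Nat) : Int) := by push_cast; ring
    have e2 : 5*(k:Int) + 2 - (k:Int) = ((4*k+2 : Nat) : Int) := by push_cast; ring
    have e3 : 5*(k:Int) + 3 - (k:Int) = ((4*k+3 : Nat) : Int) := by push_cast; ring
    rw [e0, e1, e2, e3]
    simp only [PySem.List.pyGetD_natCast]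
    rw [take4_drop s1 (4*k) (by omega)]
    simp

-- B's whole result, characterised.
theorem B_char (s1 s2 : List Int) : func_alt s1 s2 =
    (List.range (min (s1.length/4) s2.length)).flatMap
        (fun i => (s1.drop (4*i)).take 4 ++ [s2.getD i 0])
      ++ s1.drop (4 * min (s1.length/4) s2.length) ++ s2.drop (min (s1.length/4) s2.length) := by
  unfold func_alt
  simp only []
  have hfd : PySem.Int.floordiv ((s1.length : Nat) : Int) 4 = ((s1.length/4 : Nat) : Int) := by
    exact_mod_cast PySem.Int.floordiv_natCast s1.length 4
  have hmin : min (PySem.Int.floordiv ((s1.length : Nat) : Int) 4) ((s2.length : Nat) : Int)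
      = ((min (s1.length/4) s2.length : Nat) : Int) := by
    rw [hfd]; norm_cast
  rw [hmin]
  have h5 : 5 * ((min (s1.length/4) s2.length : Nat) : Int)
      = ((5 * min (s1.length/4) s2.length : Nat) : Int) := by push_cast; ring
  have h4 : 4 * ((min (s1.length/4) s2.length : Nat) : Int)
      = ((4 * min (s1.length/4) s2.length : Nat) : Int) := by push_cast; ring
  rw [h5, h4, PySem.List.slice_from_natCast, PySem.List.slice_from_natCast,
      PySem.List.pyRange_zero_natCast, List.map_map]
  have hb := BheadNat s1 s2 (min (s1.length/4) s2.length) (by omega) (by omega)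
  rw [← hb]
  rfl

theorem func_eq_alt (s1 s2 : List Int) : func s1 s2 = func_alt s1 s2 := by
  rw [B_char]
  unfold func
  simp only []
  set L := s1.length with hL
  set M := s2.length with hM
  have hfd : PySem.Int.floordiv (L:Int) 4 = ((L/4 : Nat) : Int) := by
    exact_mod_cast PySem.Int.floordiv_natCast L 4
  split_ifs with h1 h2
  · -- len(s1) = 4*len(s2)
    have hE : L = 4 * M := by omega
    have hm : min (L/4) M = M := by omega
    rw [Aloop, hm, List.drop_eq_nil_of_le (as := s1) (i := 4*M) (by omega),
        List.drop_eq_nil_of_le (as := s2) (i := M) (by omega)]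
    simp
  · -- len(s1) < 4*len(s2)
    have hlt : L < 4 * M := by omega
    have hm : min (L/4) M = L/4 := by omega
    rw [hfd, Aloop]
    have hc : ((L/4 : Nat) : Int) * 4 = (((L/4)*4 : Nat) : Int) := by push_cast; ring
    rw [hc, PySem.List.slice_from_natCast, PySem.List.slice_from_natCast, hm]
    have e : (L/4)*4 = 4*(L/4) := Nat.mul_comm _ _
    rw [e]
  · -- len(s1) > 4*len(s2)
    have hgt : 4 * M < L := by omega
    have hm : min (L/4) M = M := by omega
    rw [Aloop]
    have hc : 4 * (M : Int) = ((4*M : Nat) : Int) := by push_cast; ring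
    rw [hc, PySem.List.slice_from_natCast, hm,
        List.drop_eq_nil_of_le (as := s2) (i := M) (by omega)]
    simp

-- ===== VERDICT (by name: the statement is the Claim_ definition above) =====
theorem func_spec : Claim_equal_func := by
  intro s1 s2 _
  unfold Spec_func
  exact func_eq_alt s1 s2
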